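-- pv_equiv track=rewrite | github.com/ByeongjunCho/TIL | 알고리즘공부/List2/4012_cook.py | cook_min
-- ===== SOURCE A (Python) =====
-- def cook_min(arr, N):
--     min_cook = 20000 * 16
--     for i in range(1<<N):
--         cook = list(range(N))
--         cook_tmp = cook[:]
--         tmp1 = 0
--         tmp2 = 0
--         tmp = []
--         for j in range(len(arr)):
--             if i&(1<<j):
--                 tmp.append(cook_tmp[N-1-j])
--         # tmp = [cook_tmp[N-1-x] for x in range(len(arr)) if i&(1<<x)]
--
--         if len(tmp) != N/2:
--             continue
--
--         else:
--
--             for i in range(len(tmp)):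
--                 cook.pop(tmp[i])
--
--             for i in range(len(cook)):
--                 for j in range(len(cook)):
--                     tmp1 += arr[tmp[i]][tmp[j]]
--                     tmp2 += arr[cook[i]][cook[j]]
--
--             if min_cook > abs(tmp1-tmp2):
--                 min_cook = abs(tmp1-tmp2)
--     return min_cook
-- ===== SOURCE B (Python) =====
-- def _combs(xs, k):
--     # all k-element subsets of xs, each as an increasing sublist of xs
--     if k == 0:
--         return [[]]
--     if len(xs) < k:
--         return []
--     first, rest = xs[0], xs[1:]
--     return [[first] + c for c in _combs(rest, k - 1)] + _combs(rest, k)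
--
--
-- def cook_min(arr, N):
--     best = 20000 * 16
--     if N % 2 == 0:
--         for group in _combs(list(range(N)), N // 2):
--             comp = [x for x in range(N) if x not in group]
--             g1 = sum(arr[a][b] for a in group for b in group)
--             g2 = sum(arr[a][b] for a in comp for b in comp)
--             d = abs(g1 - g2)
--             if d < best:
--                 best = d
--     return best
-- ===== Notes on version B (the rewrite author's own statement) =====
-- stated objective: alternative
-- what changed: Replaces the 2^N bitmask scan (building each candidate by bit tests and deriving the complement by popping positions from a scratch list) with direct recursive generation of only the C(N,N/2) half-size index combinations, computing the complement by a filter; odd N yields no combinations and keeps the 320000 sentinel exactly as A does.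
-- outside the precondition, e.g. on cook_min([[1]], 4): A returns 320000, B raises IndexError
import Mathlib
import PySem

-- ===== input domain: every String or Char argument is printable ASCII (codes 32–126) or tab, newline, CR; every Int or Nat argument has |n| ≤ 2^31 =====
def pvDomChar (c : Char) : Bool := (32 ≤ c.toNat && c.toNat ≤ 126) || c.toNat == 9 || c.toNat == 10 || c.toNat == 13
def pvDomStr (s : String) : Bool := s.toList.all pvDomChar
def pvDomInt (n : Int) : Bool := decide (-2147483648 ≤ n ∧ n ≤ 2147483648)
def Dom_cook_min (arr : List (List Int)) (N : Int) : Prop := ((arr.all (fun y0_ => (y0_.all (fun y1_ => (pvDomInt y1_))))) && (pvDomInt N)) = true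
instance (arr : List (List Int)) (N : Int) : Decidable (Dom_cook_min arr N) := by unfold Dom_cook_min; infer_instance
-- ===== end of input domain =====

-- B replaces A's 2^N bitmask scan by direct recursive generation of the C(N,N/2) half-size
-- combinations (complement by filtering); a different algorithm with the same exact result.

-- ===== PORT A =====
def cook_min (arr : List (List Int)) (N : Int) : Int :=
  -- for i in range(1 << N): masks are iterated as Nat (Python raises ValueError for N < 0, outside Pre_)
  (List.range (2 ^ N.toNat)).foldl (fun (min_cook : Int) (i : Nat) =>
    let cook : List Int := PySem.List.pyRange 0 N 1                  -- cook = list(range(N))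
    let cook_tmp : List Int := cook                                  -- cook_tmp = cook[:]
    -- for j in range(len(arr)): if i & (1 << j): tmp.append(cook_tmp[N-1-j])
    let tmp : List Int := (List.range arr.length).foldl (fun (tmp : List Int) (j : Nat) =>
        if i &&& (1 <<< j) ≠ 0 then
          tmp ++ [PySem.List.pyGetD cook_tmp (N - 1 - (j : Int)) 0]  -- default never hit: index in range for set bits
        else tmp) []
    -- len(tmp) != N/2 : Python compares with the exact float N/2; equivalent to 2*len(tmp) != N for |N| ≤ 2^31
    if 2 * (tmp.length : Int) ≠ N then min_cook
    else
      -- for i in range(len(tmp)): cook.pop(tmp[i])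
      let cook := (List.range tmp.length).foldl (fun (cook : List Int) (i2 : Nat) =>
          match PySem.List.pop? cook (PySem.List.pyGetD tmp (i2 : Int) 0) with
          | some r => r.2
          | none => cook) cook                                       -- none = IndexError, unreachable under Pre_
      -- for i in range(len(cook)): for j in range(len(cook)): tmp1 += arr[tmp[i]][tmp[j]]; tmp2 += arr[cook[i]][cook[j]]
      let p : Int × Int := (List.range cook.length).foldl (fun (p : Int × Int) (i2 : Nat) =>
          (List.range cook.length).foldl (fun (p : Int × Int) (j2 : Nat) =>
              (p.1 + PySem.List.pyGetD (PySem.List.pyGetD arr (PySem.List.pyGetD tmp (i2 : Int) 0) []) (PySem.List.pyGetD tmp (j2 : Int) 0) 0,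
               p.2 + PySem.List.pyGetD (PySem.List.pyGetD arr (PySem.List.pyGetD cook (i2 : Int) 0) []) (PySem.List.pyGetD cook (j2 : Int) 0) 0)) p) (0, 0)
      if min_cook > |p.1 - p.2| then |p.1 - p.2| else min_cook) (20000 * 16)

-- ===== PORT B =====
-- _combs(xs, k): all k-element subsets of xs, each an increasing sublist of xs
def cook_min_combs (xs : List Int) (k : Int) : List (List Int) :=
  if k = 0 then [[]]
  else if (xs.length : Int) < k then []
  else
    match xs with
    | [] => []                 -- Python raises IndexError here (reachable only for k < 0, outside Pre_)
    | first :: rest => (cook_min_combs rest (k - 1)).map (fun c => first :: c) ++ cook_min_combs rest k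

def cook_min_alt (arr : List (List Int)) (N : Int) : Int :=
  let best : Int := 20000 * 16
  if PySem.Int.mod N 2 = 0 then
    (cook_min_combs (PySem.List.pyRange 0 N 1) (PySem.Int.floordiv N 2)).foldl (fun best group =>
      let comp := (PySem.List.pyRange 0 N 1).filter (fun x => !(group.contains x))
      let g1 := (group.map (fun a => (group.map (fun b => PySem.List.pyGetD (PySem.List.pyGetD arr a []) b 0)).sum)).sum
      let g2 := (comp.map (fun a => (comp.map (fun b => PySem.List.pyGetD (PySem.List.pyGetD arr a []) b 0)).sum)).sum
      let d := |g1 - g2|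
      if d < best then d else best) best
  else best

-- ===== PRECONDITION & SPEC =====
-- Pre_ excludes: N < 0 (Python's 1 << N raises ValueError) and, for even N, matrices without a full
-- N×N top-left block, on which A either raises IndexError in the pair sums or (when len(arr) is too
-- small for any half-size subset to appear) returns the 320000 sentinel while B's combination
-- enumeration indexes out of range.  Odd N is admitted for every arr (neither program touches arr then).
def Pre_cook_min (arr : List (List Int)) (N : Int) : Prop :=
  0 ≤ N ∧ (¬ (2 ∣ N) ∨ ((N ≤ (arr.length : Int)) ∧ ∀ row ∈ arr.take N.toNat, N ≤ (row.length : Int)))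
instance (arr : List (List Int)) (N : Int) : Decidable (Pre_cook_min arr N) := by unfold Pre_cook_min; infer_instance

def pvWitness_cook_min : List (List Int) × Int := ([[0, 1], [2, 3]], 2)

def Spec_cook_min (arr : List (List Int)) (N : Int) (out : Int) : Prop := out = cook_min_alt arr N
instance (arr : List (List Int)) (N : Int) (out : Int) : Decidable (Spec_cook_min arr N out) := by unfold Spec_cook_min; infer_instance

-- ===== CLAIM (what is proved, stated in full; the proofs are below) =====
def Claim_equal_cook_min : Prop := ∀ (arr : List (List Int)) (N : Int), Dom_cook_min arr N → Pre_cook_min arr N → Spec_cook_min arr N (cook_min arr N)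

-- ===== LEMMAS AND PROOFS =====

-- proof-side vocabulary
def pvCastL (s : List Nat) : List Int := s.map (fun (j : Nat) => (j : Int))
def pvE (arr : List (List Int)) (a b : Int) : Int := PySem.List.pyGetD (PySem.List.pyGetD arr a []) b 0
def pvG (arr : List (List Int)) (l : List Int) : Int := (l.map (fun a => (l.map (fun b => pvE arr a b)).sum)).sum
def pvIR (n : Nat) : List Int := pvCastL (List.range n)
def pvCompl (n : Nat) (g : List Int) : List Int := (pvIR n).filter (fun x => !(g.contains x))
def pvPsi (arr : List (List Int)) (n : Nat) (s : List Nat) : Int :=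
  |pvG arr (pvCastL s) - pvG arr (pvCompl n (pvCastL s))|
def pvBits (n i : Nat) : List Nat := (List.range n).filter (fun j => i.testBit j)
def pvRefl (n : Nat) (s : List Nat) : List Nat := s.map (fun j => n - 1 - j)
def pvCombsN : List Nat → Nat → List (List Nat)
  | _, 0 => [[]]
  | [], _ + 1 => []
  | x :: rest, k + 1 => (pvCombsN rest k).map (fun c => x :: c) ++ pvCombsN rest (k + 1)
def pvCanon (n : Nat) (s : List Nat) : List Nat := (List.range n).filter (fun x => s.contains x)
def pvMaskSubs (n k : Nat) : List (List Nat) :=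
  (List.range (2 ^ n)).filterMap (fun i => if (pvBits n i).length = k then some (pvBits n i) else none)

-- generic fold shapes
theorem pv_foldl_id {α β : Type} (l : List α) (f : β → α → β) (acc : β)
    (h : ∀ acc x, f acc x = acc) : l.foldl f acc = acc := by
  induction l generalizing acc with
  | nil => rfl
  | cons x xs ih => simp [List.foldl_cons, h, ih]

theorem pv_foldl_min {α : Type} (l : List α) (h : α → Option Int) (a : Int) :
    l.foldl (fun acc x => match h x with | some d => if acc > d then d else acc | none => acc) a
      = (l.filterMap h).foldl min a := by
  induction l generalizing a with
  | nil => rfl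
  | cons x xs ih =>
    cases hx : h x with
    | none => simp only [List.foldl_cons, List.filterMap_cons, hx]; exact ih a
    | some d =>
      simp only [List.foldl_cons, List.filterMap_cons, hx]
      rw [ih]
      congr 1
      rw [min_def]
      split_ifs <;> omega

theorem pv_foldl_min_map {α : Type} (l : List α) (v : α → Int) (a : Int) :
    l.foldl (fun acc x => if v x < acc then v x else acc) a = (l.map v).foldl min a := by
  induction l generalizing a with
  | nil => rfl
  | cons x xs ih =>
    simp only [List.foldl_cons, List.map_cons]
    rw [ih]
    congr 1
    rw [min_def]
    split_ifs <;> omega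

theorem pv_range_foldl {β γ : Type} (xs : List β) (f : γ → β → γ) (d : β) (init : γ) :
    (List.range xs.length).foldl (fun acc kk => f acc (xs.getD kk d)) init = xs.foldl f init := by
  induction xs generalizing init with
  | nil => rfl
  | cons x xs ih =>
    rw [List.length_cons, List.range_succ_eq_map, List.foldl_cons, List.foldl_map]
    simp only [List.getD_cons_zero, Nat.succ_eq_add_one, List.getD_cons_succ]
    exact ih (f init x)

theorem pv_range_map {β γ : Type} (xs : List β) (h : β → γ) (d : β) :
    (List.range xs.length).map (fun kk => h (xs.getD kk d)) = xs.map h := by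
  induction xs with
  | nil => rfl
  | cons x xs ih =>
    rw [List.length_cons, List.range_succ_eq_map, List.map_cons, List.map_map]
    simp only [List.getD_cons_zero, Function.comp_def, Nat.succ_eq_add_one, List.getD_cons_succ, List.map_cons]
    rw [ih]

theorem pv_pair_foldl {β : Type} (l : List β) (F G : β → Int) (p : Int × Int) :
    l.foldl (fun p x => (p.1 + F x, p.2 + G x)) p = (p.1 + (l.map F).sum, p.2 + (l.map G).sum) := by
  induction l generalizing p with
  | nil => simp
  | cons x xs ih =>
    simp only [List.foldl_cons, List.map_cons, List.sum_cons]
    rw [ih]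
    simp only [Prod.ext_iff]
    constructor <;> ring

-- A's inner loops
theorem pv_pyRange_nat (n : Nat) : PySem.List.pyRange 0 (n : Int) 1 = pvIR n := by
  rw [PySem.List.pyRange_one]
  unfold pvIR pvCastL
  simp only [sub_zero, Int.toNat_natCast, zero_add]

theorem pv_tmp_char (m n i : Nat) (hi : i < 2 ^ n) (hm : n ≤ m) :
    (List.range m).foldl (fun (tmp : List Int) (j : Nat) =>
        if i &&& (1 <<< j) ≠ 0 then
          tmp ++ [PySem.List.pyGetD (PySem.List.pyRange 0 (n : Int) 1) ((n : Int) - 1 - (j : Int)) 0]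
        else tmp) ([] : List Int)
      = pvCastL (pvRefl n (pvBits n i)) := by
  have hfun : (fun (tmp : List Int) (j : Nat) =>
      if i &&& (1 <<< j) ≠ 0 then
        tmp ++ [PySem.List.pyGetD (PySem.List.pyRange 0 (n : Int) 1) ((n : Int) - 1 - (j : Int)) 0]
      else tmp)
      = (fun (tmp : List Int) (j : Nat) =>
      if (fun j => decide (i &&& (1 <<< j) ≠ 0)) j = true then
        tmp ++ [(fun (j : Nat) => PySem.List.pyGetD (PySem.List.pyRange 0 (n : Int) 1) ((n : Int) - 1 - (j : Int)) 0) j]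
      else tmp) := by
    funext tmp j; simp
  rw [hfun, PySem.List.foldl_append_if, List.nil_append]
  have hsplit : (List.range m).filter (fun j => decide (i &&& (1 <<< j) ≠ 0))
      = (List.range n).filter (fun j => decide (i &&& (1 <<< j) ≠ 0)) := by
    obtain ⟨w, rfl⟩ : ∃ w, m = n + w := ⟨m - n, by omega⟩
    rw [List.range_add, List.filter_append]
    have hnil : ((List.range w).map (n + ·)).filter (fun j => decide (i &&& (1 <<< j) ≠ 0)) = [] := by
      rw [List.filter_eq_nil_iff]
      intro a ha
      simp only [List.mem_map, List.mem_range] at ha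
      obtain ⟨y, _, rfl⟩ := ha
      have hz : i &&& (1 <<< (n + y)) = 0 := by
        rw [Nat.one_shiftLeft, Nat.and_two_pow]
        have hb : i.testBit (n + y) = false :=
          Nat.testBit_lt_two_pow (lt_of_lt_of_le hi (Nat.pow_le_pow_right (by norm_num) (by omega)))
        rw [hb]
        simp
      simp [hz]
    rw [hnil, List.append_nil]
  rw [hsplit]
  have hfilt : (List.range n).filter (fun j => decide (i &&& (1 <<< j) ≠ 0)) = pvBits n i := by
    unfold pvBits
    apply List.filter_congr
    intro j _
    rw [Nat.one_shiftLeft, Nat.and_two_pow]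
    cases hb : i.testBit j <;> simp [hb]
  rw [hfilt]
  unfold pvCastL pvRefl
  rw [List.map_map]
  symm
  apply List.map_congr_left
  intro j hj
  have hjn : j < n := by
    have := (List.mem_filter.mp hj).1
    simpa [List.mem_range] using this
  have hidx : ((n : Int) - 1 - (j : Int)) = ((n - 1 - j : Nat) : Int) := by omega
  rw [hidx, pv_pyRange_nat]
  unfold pvIR pvCastL
  rw [PySem.List.pyGetD_natCast, PySem.List.getD_map_range _ _ _ _ (by omega)]
  simp

theorem pv_filter_prefix (n v : Nat) (removed : List Nat) (hv : v < n)
    (hro : ∀ r ∈ removed, v < r) :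
    (List.range n).filter (fun x => !(removed.contains x))
      = List.range (v + 1)
        ++ ((List.range (n - v - 1)).map ((v + 1) + ·)).filter (fun x => !(removed.contains x)) := by
  obtain ⟨w, hw⟩ : ∃ w, n = (v + 1) + w := ⟨n - v - 1, by omega⟩
  subst hw
  rw [List.range_add, List.filter_append]
  have hw' : (v + 1) + w - v - 1 = w := by omega
  rw [hw']
  congr 1
  rw [List.filter_eq_self]
  intro a ha
  simp only [List.mem_range] at ha
  have hmem : a ∉ removed := fun hmem => by have := hro a hmem; omega
  simp [hmem]

theorem pv_erase_filter (n v : Nat) (removed : List Nat) (hv : v < n)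
    (hro : ∀ r ∈ removed, v < r) :
    ((List.range n).filter (fun x => !(removed.contains x))).eraseIdx v
      = (List.range n).filter (fun x => !((v :: removed).contains x)) := by
  obtain ⟨w, hw⟩ : ∃ w, n = (v + 1) + w := ⟨n - v - 1, by omega⟩
  subst hw
  have hw' : (v + 1) + w - v - 1 = w := by omega
  rw [pv_filter_prefix _ v removed hv hro, hw']
  rw [List.eraseIdx_append_of_lt_length (by simp)]
  have hL : (List.range (v + 1)).eraseIdx v = List.range v := by
    rw [List.range_succ, List.eraseIdx_append_of_length_le (by simp)]
    simp
  rw [hL]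
  have hB : (List.range (v + 1)).filter (fun x => !((v :: removed).contains x)) = List.range v := by
    rw [List.range_succ, List.filter_append]
    have hBa : (List.range v).filter (fun x => !((v :: removed).contains x)) = List.range v := by
      rw [List.filter_eq_self]
      intro a ha
      simp only [List.mem_range] at ha
      have h1 : a ∉ removed := fun hmem => by have := hro a hmem; omega
      have h2 : a ≠ v := by omega
      simp [h1, h2]
    have hBb : ([v]).filter (fun x => !((v :: removed).contains x)) = [] := by simp
    rw [hBa, hBb, List.append_nil]
  have hC : ((List.range w).map (fun x => (v + 1) + x)).filter (fun x => !((v :: removed).contains x))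
      = ((List.range w).map (fun x => (v + 1) + x)).filter (fun x => !(removed.contains x)) := by
    apply List.filter_congr
    intro x hx
    simp only [List.mem_map, List.mem_range] at hx
    obtain ⟨y, _, rfl⟩ := hx
    have hne : (v + 1) + y ≠ v := by omega
    simp [hne]
  conv_rhs => rw [List.range_add]
  rw [List.filter_append, hB, hC]

theorem pv_popfold (n : Nat) (t : List Nat) : ∀ (removed : List Nat),
    t.Pairwise (· > ·) → (∀ x ∈ t, x < n) → (∀ x ∈ t, ∀ r ∈ removed, x < r) →
    (pvCastL t).foldl (fun cook v =>
        match PySem.List.pop? cook v with | some r => r.2 | none => cook)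
      (pvCastL ((List.range n).filter (fun x => !(removed.contains x))))
      = pvCastL ((List.range n).filter (fun x => !(removed.contains x) && !(t.contains x))) := by
  induction t with
  | nil =>
    intro removed _ _ _
    simp only [pvCastL, List.map_nil, List.foldl_nil]
    congr 1
    symm
    apply List.filter_congr
    intro x _
    cases removed.contains x <;> rfl
  | cons v t' ih =>
    intro removed hpw hb hrm
    have hvn : v < n := hb v (by simp)
    have hro : ∀ r ∈ removed, v < r := fun r hr => hrm v (by simp) r hr
    have hlen : v < ((List.range n).filter (fun x => !(removed.contains x))).length := by
      rw [pv_filter_prefix n v removed hvn hro, List.length_append, List.length_range]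
      omega
    have hlen2 : v < (pvCastL ((List.range n).filter (fun x => !(removed.contains x)))).length := by
      simpa [pvCastL] using hlen
    rw [show pvCastL (v :: t') = ((v : Nat) : Int) :: pvCastL t' from rfl, List.foldl_cons]
    rw [PySem.List.pop?_natCast _ v hlen2]
    have herase : (pvCastL ((List.range n).filter (fun x => !(removed.contains x)))).eraseIdx v
        = pvCastL (((List.range n).filter (fun x => !(removed.contains x))).eraseIdx v) := by
      unfold pvCastL
      rw [List.eraseIdx_map]
    rw [herase, pv_erase_filter n v removed hvn hro]
    rw [ih (v :: removed) hpw.of_cons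
        (fun x hx => hb x (List.mem_cons_of_mem _ hx))
        (fun x hx r hr => by
          rcases List.mem_cons.mp hr with rfl | hr'
          · exact (List.pairwise_cons.mp hpw).1 x hx
          · exact hrm x (List.mem_cons_of_mem _ hx) r hr')]
    congr 1
    apply List.filter_congr
    intro x _
    by_cases hxv : x = v <;> by_cases hxr : x ∈ removed <;> by_cases hxt : x ∈ t' <;>
      simp [hxv, hxr, hxt]

theorem pv_compl_cast (n : Nat) (t : List Nat) :
    pvCompl n (pvCastL t) = pvCastL ((List.range n).filter (fun x => !(t.contains x))) := by
  unfold pvCompl pvIR pvCastL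
  rw [List.filter_map]
  congr 1
  apply List.filter_congr
  intro x _
  simp only [Function.comp_apply]
  by_cases hx : x ∈ t <;> simp [List.mem_map, hx]

theorem pv_filter_mem_length (n : Nat) (t : List Nat) (hn : t.Nodup) (hb : ∀ x ∈ t, x < n) :
    ((List.range n).filter (fun x => t.contains x)).length = t.length := by
  have hnodup : ((List.range n).filter (fun x => t.contains x)).Nodup :=
    List.nodup_range.filter _
  have hfin : ((List.range n).filter (fun x => t.contains x)).toFinset = t.toFinset := by
    ext a
    simp only [List.mem_toFinset, List.mem_filter, List.mem_range]
    constructor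
    · rintro ⟨_, h⟩; simpa using h
    · intro h; exact ⟨hb a h, by simpa using h⟩
  rw [← List.toFinset_card_of_nodup hnodup, hfin, List.toFinset_card_of_nodup hn]

theorem pv_filter_not_length (n : Nat) (t : List Nat) (hn : t.Nodup) (hb : ∀ x ∈ t, x < n) :
    ((List.range n).filter (fun x => !(t.contains x))).length = n - t.length := by
  have hperm := (List.filter_append_perm (fun x => t.contains x) (List.range n)).length_eq
  rw [List.length_append, pv_filter_mem_length n t hn hb, List.length_range] at hperm
  omega

theorem pv_gsum_range (arr : List (List Int)) (u : List Int) :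
    ((List.range u.length).map (fun i2 =>
        ((List.range u.length).map (fun j2 => pvE arr (u.getD i2 0) (u.getD j2 0))).sum)).sum
      = pvG arr u := by
  unfold pvG
  have hin : ∀ i2 : Nat,
      ((List.range u.length).map (fun j2 => pvE arr (u.getD i2 0) (u.getD j2 0))).sum
        = (u.map (fun b => pvE arr (u.getD i2 0) b)).sum := by
    intro i2
    rw [pv_range_map u (fun b => pvE arr (u.getD i2 0) b) 0]
  rw [List.map_congr_left (fun i2 _ => hin i2)]
  rw [pv_range_map u (fun a => (u.map (fun b => pvE arr a b)).sum) 0]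

theorem pv_sum_block (arr : List (List Int)) (tmp cook : List Int) (hl : tmp.length = cook.length) :
    (List.range cook.length).foldl (fun (p : Int × Int) (i2 : Nat) =>
        (List.range cook.length).foldl (fun (p : Int × Int) (j2 : Nat) =>
            (p.1 + PySem.List.pyGetD (PySem.List.pyGetD arr (tmp.getD i2 0) []) (tmp.getD j2 0) 0,
             p.2 + PySem.List.pyGetD (PySem.List.pyGetD arr (cook.getD i2 0) []) (cook.getD j2 0) 0)) p)
      ((0 : Int), (0 : Int))
      = (pvG arr tmp, pvG arr cook) := by
  have houter : (fun (p : Int × Int) (i2 : Nat) =>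
      (List.range cook.length).foldl (fun (p : Int × Int) (j2 : Nat) =>
        (p.1 + PySem.List.pyGetD (PySem.List.pyGetD arr (tmp.getD i2 0) []) (tmp.getD j2 0) 0,
         p.2 + PySem.List.pyGetD (PySem.List.pyGetD arr (cook.getD i2 0) []) (cook.getD j2 0) 0)) p)
      = (fun (p : Int × Int) (i2 : Nat) =>
        (p.1 + ((List.range cook.length).map (fun j2 => PySem.List.pyGetD (PySem.List.pyGetD arr (tmp.getD i2 0) []) (tmp.getD j2 0) 0)).sum,
         p.2 + ((List.range cook.length).map (fun j2 => PySem.List.pyGetD (PySem.List.pyGetD arr (cook.getD i2 0) []) (cook.getD j2 0) 0)).sum)) := by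
    funext p i2
    exact pv_pair_foldl _ _ _ p
  rw [houter, pv_pair_foldl]
  rw [Prod.mk.injEq]
  constructor
  · simp only [zero_add]
    rw [← hl]
    exact pv_gsum_range arr tmp
  · simp only [zero_add]
    exact pv_gsum_range arr cook

theorem pv_A_even_step (arr : List (List Int)) (n k : Nat) (hnk : n = 2 * k) (hm : n ≤ arr.length)
    (acc : Int) (i : Nat) (hi2 : i < 2 ^ n) :
    (let cook : List Int := PySem.List.pyRange 0 (n : Int) 1
     let cook_tmp : List Int := cook
     let tmp : List Int := (List.range arr.length).foldl (fun (tmp : List Int) (j : Nat) =>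
        if i &&& (1 <<< j) ≠ 0 then
          tmp ++ [PySem.List.pyGetD cook_tmp ((n : Int) - 1 - (j : Int)) 0]
        else tmp) []
     if 2 * (tmp.length : Int) ≠ (n : Int) then acc
     else
      let cook := (List.range tmp.length).foldl (fun (cook : List Int) (i2 : Nat) =>
          match PySem.List.pop? cook (PySem.List.pyGetD tmp (i2 : Int) 0) with
          | some r => r.2
          | none => cook) cook
      let p : Int × Int := (List.range cook.length).foldl (fun (p : Int × Int) (i2 : Nat) =>
          (List.range cook.length).foldl (fun (p : Int × Int) (j2 : Nat) =>
              (p.1 + PySem.List.pyGetD (PySem.List.pyGetD arr (PySem.List.pyGetD tmp (i2 : Int) 0) []) (PySem.List.pyGetD tmp (j2 : Int) 0) 0,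
               p.2 + PySem.List.pyGetD (PySem.List.pyGetD arr (PySem.List.pyGetD cook (i2 : Int) 0) []) (PySem.List.pyGetD cook (j2 : Int) 0) 0)) p) (0, 0)
      if acc > |p.1 - p.2| then |p.1 - p.2| else acc)
    = (match (if (pvBits n i).length = k then some (pvPsi arr n (pvRefl n (pvBits n i))) else none) with
       | some d => if acc > d then d else acc
       | none => acc) := by
  have htmp := pv_tmp_char arr.length n i hi2 hm
  dsimp only
  rw [htmp]
  have hlen : ((pvCastL (pvRefl n (pvBits n i))).length : Int) = ((pvBits n i).length : Int) := by
    simp [pvCastL, pvRefl]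
  by_cases hcl : (pvBits n i).length = k
  · rw [if_neg (by rw [hlen]; omega), if_pos hcl]
    have hpw : (pvRefl n (pvBits n i)).Pairwise (· > ·) := by
      have hpb : (pvBits n i).Pairwise (· < ·) :=
        List.Pairwise.sublist List.filter_sublist List.pairwise_lt_range
      have hbb : ∀ x ∈ pvBits n i, x < n := by
        intro x hx
        have := List.filter_sublist (l := List.range n) (p := fun j => i.testBit j) |>.subset hx
        simpa [List.mem_range] using this
      unfold pvRefl
      rw [List.pairwise_map]
      refine List.Pairwise.imp_of_mem ?_ hpb
      intro a b ha hb hab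
      have := hbb b hb
      omega
    have hbb : ∀ x ∈ pvBits n i, x < n := by
      intro x hx
      have := List.filter_sublist (l := List.range n) (p := fun j => i.testBit j) |>.subset hx
      simpa [List.mem_range] using this
    have hrb : ∀ x ∈ pvRefl n (pvBits n i), x < n := by
      intro x hx
      simp only [pvRefl, List.mem_map] at hx
      obtain ⟨j, hj, rfl⟩ := hx
      have := hbb j hj
      omega
    have hrn : (pvRefl n (pvBits n i)).Nodup := by
      have hnd : (pvBits n i).Nodup := List.nodup_range.filter _
      refine hnd.map_on ?_
      intro a ha b hb heq
      have := hbb a ha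
      have := hbb b hb
      omega
    -- the pop loop
    simp only [PySem.List.pyGetD_natCast]
    have hpoploop := pv_range_foldl (pvCastL (pvRefl n (pvBits n i)))
        (fun (cook : List Int) (v : Int) =>
          match PySem.List.pop? cook v with | some r => r.2 | none => cook) (0 : Int)
        (PySem.List.pyRange 0 (n : Int) 1)
    rw [hpoploop]
    rw [pv_pyRange_nat]
    have hinit : pvIR n = pvCastL ((List.range n).filter (fun x => !(([] : List Nat).contains x))) := by
      unfold pvIR
      congr 1
      simp
    rw [hinit, pv_popfold n (pvRefl n (pvBits n i)) [] hpw hrb (by simp)]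
    have hres : ((List.range n).filter (fun x => !(([] : List Nat).contains x) && !((pvRefl n (pvBits n i)).contains x)))
        = ((List.range n).filter (fun x => !((pvRefl n (pvBits n i)).contains x))) := by
      apply List.filter_congr
      intro x _
      simp
    rw [hres, ← pv_compl_cast]
    -- lengths
    have hll : (pvCastL (pvRefl n (pvBits n i))).length
        = (pvCompl n (pvCastL (pvRefl n (pvBits n i)))).length := by
      rw [pv_compl_cast]
      have h1 : (pvCastL (pvRefl n (pvBits n i))).length = k := by
        simpa [pvCastL, pvRefl] using hcl
      have h2 : (pvRefl n (pvBits n i)).length = k := by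
        simpa [pvRefl] using hcl
      rw [h1]
      show _ = (pvCastL _).length
      rw [show ∀ (t : List Nat), (pvCastL t).length = t.length from fun t => by simp [pvCastL]]
      rw [pv_filter_not_length n _ hrn hrb, h2]
      omega
    rw [pv_sum_block arr _ _ hll]
    rfl
  · rw [if_pos (by rw [hlen]; omega), if_neg hcl]

theorem pv_A_even (arr : List (List Int)) (n k : Nat) (hnk : n = 2 * k) (hm : n ≤ arr.length) :
    cook_min arr (n : Int)
      = ((pvMaskSubs n k).map (fun s => pvPsi arr n (pvRefl n s))).foldl min 320000 := by
  have hstep := pv_A_even_step arr n k hnk hm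
  calc cook_min arr (n : Int)
      = (List.range (2 ^ n)).foldl (fun acc i =>
          match (if (pvBits n i).length = k then some (pvPsi arr n (pvRefl n (pvBits n i))) else none) with
          | some d => if acc > d then d else acc
          | none => acc) (20000 * 16) := by
        unfold cook_min
        rw [Int.toNat_natCast]
        apply PySem.List.foldl_congr_mem
        intro acc i hi
        exact hstep acc i (List.mem_range.mp hi)
    _ = ((pvMaskSubs n k).map (fun s => pvPsi arr n (pvRefl n s))).foldl min 320000 := by
        rw [pv_foldl_min]
        have h1 : (List.range (2 ^ n)).filterMap
            (fun i => if (pvBits n i).length = k then some (pvPsi arr n (pvRefl n (pvBits n i))) else none)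
            = (pvMaskSubs n k).map (fun s => pvPsi arr n (pvRefl n s)) := by
          unfold pvMaskSubs
          rw [List.map_filterMap]
          congr 1
          funext i
          by_cases hb : (pvBits n i).length = k <;> simp [hb]
        rw [h1]
        norm_num

theorem pv_combsN_zero (xs : List Nat) : pvCombsN xs 0 = [[]] := by
  cases xs <;> rfl

theorem pv_combsN_nil_succ (k : Nat) : pvCombsN [] (k + 1) = [] := rfl

theorem pv_combsN_cons_succ (x : Nat) (rest : List Nat) (k : Nat) :
    pvCombsN (x :: rest) (k + 1)
      = (pvCombsN rest k).map (fun c => x :: c) ++ pvCombsN rest (k + 1) := rfl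

theorem pv_combsN_nil (xs : List Nat) (k : Nat) (h : xs.length < k) : pvCombsN xs k = [] := by
  induction xs generalizing k with
  | nil =>
    cases k with
    | zero => omega
    | succ k => rfl
  | cons x xs ih =>
    cases k with
    | zero => simp at h
    | succ k =>
      simp only [List.length_cons] at h
      show (pvCombsN xs k).map (fun c => x :: c) ++ pvCombsN xs (k + 1) = []
      rw [ih (k := k) (by omega), ih (k := k + 1) (by omega)]
      simp

theorem pv_cmc_zero (xs : List Int) : cook_min_combs xs 0 = [[]] := by
  rw [cook_min_combs.eq_def]
  simp

theorem pv_cmc_pos_short (xs : List Int) (k : Int) (hk : k ≠ 0) (hlen : (xs.length : Int) < k) :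
    cook_min_combs xs k = [] := by
  rw [cook_min_combs.eq_def]
  rw [if_neg hk, if_pos hlen]

theorem pv_cmc_cons (x : Int) (rest : List Int) (k : Int) (hk : k ≠ 0)
    (hlen : ¬ (((x :: rest).length : Int) < k)) :
    cook_min_combs (x :: rest) k
      = (cook_min_combs rest (k - 1)).map (fun c => x :: c) ++ cook_min_combs rest k := by
  rw [cook_min_combs.eq_def]
  rw [if_neg hk, if_neg hlen]

theorem pv_combs_cast (xs : List Nat) (k : Nat) :
    cook_min_combs (pvCastL xs) (k : Int) = (pvCombsN xs k).map pvCastL := by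
  induction xs generalizing k with
  | nil =>
    cases k with
    | zero => rw [Nat.cast_zero, pv_cmc_zero, pv_combsN_zero]; rfl
    | succ k =>
      rw [pv_cmc_pos_short _ _ (by exact_mod_cast Nat.succ_ne_zero k)
        (by simp [pvCastL])]
      rw [pv_combsN_nil_succ]
      rfl
  | cons x xs ih =>
    cases k with
    | zero => rw [Nat.cast_zero, pv_cmc_zero, pv_combsN_zero]; rfl
    | succ k =>
      rw [show pvCastL (x :: xs) = ((x : Nat) : Int) :: pvCastL xs from rfl]
      by_cases hlt : (x :: xs).length < k + 1
      · rw [pv_cmc_pos_short _ _ (by exact_mod_cast Nat.succ_ne_zero k)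
          (by simp only [List.length_cons, pvCastL, List.length_map]; exact_mod_cast hlt)]
        rw [pv_combsN_nil _ _ hlt]
        rfl
      · rw [pv_cmc_cons _ _ _ (by exact_mod_cast Nat.succ_ne_zero k)
          (by simp only [List.length_cons, pvCastL, List.length_map]; intro hcon; exact hlt (by exact_mod_cast hcon))]
        rw [show ((k + 1 : Nat) : Int) - 1 = (k : Int) by push_cast; ring]
        rw [ih k, ih (k + 1)]
        rw [pv_combsN_cons_succ]
        rw [List.map_append]
        congr 1
        rw [List.map_map, List.map_map]
        apply List.map_congr_left
        intro c _
        rfl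

theorem pv_B_even (arr : List (List Int)) (n k : Nat) (hnk : n = 2 * k) :
    cook_min_alt arr (n : Int)
      = ((pvCombsN (List.range n) k).map (pvPsi arr n)).foldl min 320000 := by
  unfold cook_min_alt
  have hmod : PySem.Int.mod (n : Int) 2 = 0 :=
    (PySem.Int.mod_eq_zero_iff_dvd _ _).mpr ⟨(k : Int), by rw [hnk]; push_cast; ring⟩
  rw [if_pos hmod]
  have hdiv : PySem.Int.floordiv (n : Int) 2 = (k : Int) := by
    rw [PySem.Int.floordiv_eq_ediv_of_pos (by norm_num)]
    omega
  rw [hdiv, pv_pyRange_nat]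
  rw [show pvIR n = pvCastL (List.range n) from rfl, pv_combs_cast]
  refine Eq.trans (pv_foldl_min_map ((pvCombsN (List.range n) k).map pvCastL)
      (fun group => |pvG arr group - pvG arr ((pvIR n).filter (fun x => !(group.contains x)))|)
      (20000 * 16)) ?_
  rw [List.map_map]
  show ((pvCombsN (List.range n) k).map (pvPsi arr n)).foldl min (20000 * 16) = _
  norm_num

-- the mask/combination correspondence
theorem pv_combsN_map (xs : List Nat) (k : Nat) (f : Nat → Nat) :
    pvCombsN (xs.map f) k = (pvCombsN xs k).map (List.map f) := by
  induction xs generalizing k with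
  | nil => cases k <;> rfl
  | cons x xs ih =>
    cases k with
    | zero => rfl
    | succ k =>
      simp only [List.map_cons, pvCombsN, ih, List.map_append, List.map_map]
      rfl

theorem pv_mem_combsN (xs : List Nat) (k : Nat) (s : List Nat) :
    s ∈ pvCombsN xs k ↔ s.length = k ∧ List.Sublist s xs := by
  induction xs generalizing k s with
  | nil =>
    cases k with
    | zero =>
      constructor
      · intro h
        have : s = [] := by simpa [pvCombsN] using h
        subst this
        exact ⟨rfl, List.Sublist.refl _⟩
      · rintro ⟨h1, h2⟩
        have : s = [] := List.length_eq_zero_iff.mp h1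
        subst this
        simp [pvCombsN]
    | succ k =>
      constructor
      · intro h
        simp [pvCombsN] at h
      · rintro ⟨h1, h2⟩
        have : s = [] := List.sublist_nil.mp h2
        subst this
        simp at h1
  | cons x xs ih =>
    cases k with
    | zero =>
      constructor
      · intro h
        have : s = [] := by simpa [pvCombsN] using h
        subst this
        exact ⟨rfl, List.nil_sublist _⟩
      · rintro ⟨h1, _⟩
        have : s = [] := List.length_eq_zero_iff.mp h1
        subst this
        simp [pvCombsN]
    | succ k =>
      show s ∈ (pvCombsN xs k).map (fun c => x :: c) ++ pvCombsN xs (k + 1) ↔ _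
      rw [List.mem_append, List.mem_map]
      constructor
      · rintro (⟨c, hc, rfl⟩ | h)
        · obtain ⟨hlen, hsub⟩ := (ih k c).mp hc
          exact ⟨by simp [hlen], List.sublist_cons_iff.mpr (Or.inr ⟨c, rfl, hsub⟩)⟩
        · obtain ⟨hlen, hsub⟩ := (ih (k + 1) s).mp h
          exact ⟨hlen, hsub.trans (List.sublist_cons_self x xs)⟩
      · rintro ⟨hlen, hsub⟩
        rcases List.sublist_cons_iff.mp hsub with h | ⟨r, rfl, hr⟩
        · exact Or.inr ((ih (k + 1) s).mpr ⟨hlen, h⟩)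
        · exact Or.inl ⟨r, (ih k r).mpr ⟨by simpa using hlen, hr⟩, rfl⟩

theorem pv_nodup_combsN (xs : List Nat) (k : Nat) (h : xs.Nodup) : (pvCombsN xs k).Nodup := by
  suffices haux : ∀ (ys : List Nat), ys.Nodup → ∀ (kk : Nat), (pvCombsN ys kk).Nodup from haux xs h k
  clear h k xs
  intro xs
  induction xs with
  | nil => intro _ k; cases k <;> simp [pvCombsN]
  | cons x xs ih =>
    intro h k
    have hx : x ∉ xs := (List.nodup_cons.mp h).1
    have hxs : xs.Nodup := (List.nodup_cons.mp h).2
    cases k with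
    | zero => simp [pvCombsN]
    | succ k =>
      show ((pvCombsN xs k).map (fun c => x :: c) ++ pvCombsN xs (k + 1)).Nodup
      apply List.Nodup.append
      · exact (ih hxs k).map_on (fun c1 _ c2 _ hcc => by
          injection hcc)
      · exact ih hxs (k + 1)
      · rw [List.disjoint_left]
        rintro a ha ha2
        obtain ⟨c, _, rfl⟩ := List.mem_map.mp ha
        have hsub := ((pv_mem_combsN xs (k + 1) (x :: c)).mp ha2).2
        exact hx (hsub.subset (by simp))

theorem pv_interleave (m : Nat) :
    (List.range (2 * m)).Perm
      ((List.range m).map (fun r => 2 * r) ++ (List.range m).map (fun r => 2 * r + 1)) := by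
  induction m with
  | zero => simp
  | succ m ih =>
    have h2 : 2 * (m + 1) = (2 * m) + 1 + 1 := by ring
    rw [h2, List.range_succ, List.range_succ, List.range_succ]
    rw [List.perm_iff_count] at ih ⊢
    intro a
    have h := ih a
    simp only [List.count_append, List.map_append, List.map_cons, List.map_nil] at h ⊢
    omega

theorem pv_bits_even (n r : Nat) : pvBits (n + 1) (2 * r) = (pvBits n r).map (· + 1) := by
  unfold pvBits
  rw [List.range_succ_eq_map]
  have h0 : (2 * r).testBit 0 = false := by
    rw [Nat.testBit_zero]
    simp only [decide_eq_false_iff_not]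
    omega
  rw [List.filter_cons_of_neg (by simp [h0]), List.filter_map]
  have hcomp : ((fun j => (2 * r).testBit j) ∘ Nat.succ) = (fun j => r.testBit j) := by
    funext j
    simp only [Function.comp_apply, Nat.succ_eq_add_one, Nat.testBit_succ]
    congr 1
    omega
  rw [hcomp]

theorem pv_bits_odd (n r : Nat) : pvBits (n + 1) (2 * r + 1) = 0 :: (pvBits n r).map (· + 1) := by
  unfold pvBits
  rw [List.range_succ_eq_map]
  have h0 : (2 * r + 1).testBit 0 = true := by
    rw [Nat.testBit_zero]
    simp only [decide_eq_true_eq]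
    omega
  rw [List.filter_cons_of_pos (by simp [h0]), List.filter_map]
  have hcomp : ((fun j => (2 * r + 1).testBit j) ∘ Nat.succ) = (fun j => r.testBit j) := by
    funext j
    simp only [Function.comp_apply, Nat.succ_eq_add_one, Nat.testBit_succ]
    congr 1
    omega
  rw [hcomp]

theorem pv_crux (n : Nat) : ∀ (k : Nat), (pvMaskSubs n k).Perm (pvCombsN (List.range n) k) := by
  induction n with
  | zero =>
    intro k
    cases k with
    | zero =>
      show (pvMaskSubs 0 0).Perm (pvCombsN [] 0)
      decide
    | succ k =>
      show (pvMaskSubs 0 (k + 1)).Perm (pvCombsN [] (k + 1))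
      have h1 : pvMaskSubs 0 (k + 1) = [] := by
        unfold pvMaskSubs pvBits
        simp
      rw [h1, pv_combsN_nil_succ]
  | succ n ih =>
    intro k
    unfold pvMaskSubs
    have hpow : 2 ^ (n + 1) = 2 * 2 ^ n := by ring
    rw [hpow]
    refine ((pv_interleave (2 ^ n)).filterMap _).trans ?_
    rw [List.filterMap_append, List.filterMap_map, List.filterMap_map]
    have heven : ((fun i => if (pvBits (n + 1) i).length = k then some (pvBits (n + 1) i) else none) ∘ (fun r => 2 * r))
        = fun r => if (pvBits n r).length = k then some ((pvBits n r).map (· + 1)) else none := by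
      funext r
      simp [Function.comp_apply, pv_bits_even]
    have hodd : ((fun i => if (pvBits (n + 1) i).length = k then some (pvBits (n + 1) i) else none) ∘ (fun r => 2 * r + 1))
        = fun r => if (pvBits n r).length + 1 = k then some (0 :: (pvBits n r).map (· + 1)) else none := by
      funext r
      simp [Function.comp_apply, pv_bits_odd]
    rw [heven, hodd]
    have hE : (List.range (2 ^ n)).filterMap (fun r => if (pvBits n r).length = k then some ((pvBits n r).map (· + 1)) else none)
        = (pvMaskSubs n k).map (List.map (· + 1)) := by
      unfold pvMaskSubs
      rw [List.map_filterMap]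
      congr 1
      funext r
      by_cases hb : (pvBits n r).length = k <;> simp [hb]
    cases k with
    | zero =>
      have hOnil : (List.range (2 ^ n)).filterMap
          (fun r => if (pvBits n r).length + 1 = 0 then some (0 :: (pvBits n r).map (· + 1)) else none) = [] := by
        rw [List.filterMap_eq_nil_iff]
        intro a _
        simp
      rw [hE, hOnil, List.append_nil]
      have hR : pvCombsN (List.range (n + 1)) 0 = [[]] := pv_combsN_zero _
      have hL : pvCombsN (List.range n) 0 = [[]] := pv_combsN_zero _
      rw [hR]
      refine ((ih 0).map (List.map (· + 1))).trans ?_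
      rw [hL]
      simp
    | succ k =>
      have hO : (List.range (2 ^ n)).filterMap
          (fun r => if (pvBits n r).length + 1 = k + 1 then some (0 :: (pvBits n r).map (· + 1)) else none)
          = (pvMaskSubs n k).map (fun c => 0 :: c.map (· + 1)) := by
        unfold pvMaskSubs
        rw [List.map_filterMap]
        congr 1
        funext r
        by_cases hb : (pvBits n r).length = k
        · simp [hb]
        · rw [if_neg (by omega), if_neg hb]
          simp
      rw [hE, hO]
      rw [List.range_succ_eq_map, pv_combsN_cons_succ]
      rw [pv_combsN_map, pv_combsN_map]
      refine (List.Perm.append ((ih (k + 1)).map _) ((ih k).map _)).trans ?_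
      refine (List.perm_append_comm).trans ?_
      apply List.Perm.of_eq
      congr 1
      rw [List.map_map]
      apply List.map_congr_left
      intro c _
      simp

-- invariance of the partition value under reordering, and the reflection symmetry
theorem pv_g_perm (arr : List (List Int)) (l1 l2 : List Int) (h : l1.Perm l2) :
    pvG arr l1 = pvG arr l2 := by
  unfold pvG
  have hin : ∀ a : Int, (l1.map (fun b => pvE arr a b)).sum = (l2.map (fun b => pvE arr a b)).sum :=
    fun a => (h.map _).sum_eq
  rw [List.map_congr_left (fun a _ => hin a)]
  exact (h.map _).sum_eq

theorem pv_psi_perm (arr : List (List Int)) (n : Nat) (s1 s2 : List Nat) (h : s1.Perm s2) :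
    pvPsi arr n s1 = pvPsi arr n s2 := by
  unfold pvPsi
  have hc : (pvCastL s1).Perm (pvCastL s2) := h.map _
  have hcompl : pvCompl n (pvCastL s1) = pvCompl n (pvCastL s2) := by
    unfold pvCompl
    apply List.filter_congr
    intro x _
    have hmm : x ∈ pvCastL s1 ↔ x ∈ pvCastL s2 := hc.mem_iff
    by_cases hx : x ∈ pvCastL s1
    · have hx2 : x ∈ pvCastL s2 := hmm.mp hx
      simp [hx, hx2]
    · have hx2 : x ∉ pvCastL s2 := fun hh => hx (hmm.mpr hh)
      simp [hx, hx2]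
  rw [pv_g_perm arr _ _ hc, hcompl]

theorem pv_canon_perm (n : Nat) (s : List Nat) (hn : s.Nodup) (hb : ∀ x ∈ s, x < n) :
    (pvCanon n s).Perm s := by
  unfold pvCanon
  apply List.perm_of_nodup_nodup_toFinset_eq (List.nodup_range.filter _) hn
  ext a
  simp only [List.mem_toFinset, List.mem_filter, List.mem_range]
  constructor
  · rintro ⟨_, h⟩; simpa using h
  · intro h; exact ⟨hb a h, by simpa using h⟩

theorem pv_canon_eq_self (n : Nat) (s : List Nat) (h : List.Sublist s (List.range n)) :
    pvCanon n s = s := by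
  have hnodup : s.Nodup := List.nodup_range.sublist h
  have hbound : ∀ x ∈ s, x < n := fun x hx => by
    have := h.subset hx
    simpa [List.mem_range] using this
  have hperm := pv_canon_perm n s hnodup hbound
  have hpw1 : (pvCanon n s).Pairwise (· ≤ ·) :=
    (List.Pairwise.sublist List.filter_sublist List.pairwise_lt_range).imp (fun h => le_of_lt h)
  have hpw2 : s.Pairwise (· ≤ ·) :=
    (List.Pairwise.sublist h List.pairwise_lt_range).imp (fun h => le_of_lt h)
  exact List.Perm.eq_of_pairwise (fun a b _ _ h1 h2 => le_antisymm h1 h2) hpw1 hpw2 hperm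

theorem pv_refl_refl (n : Nat) (s : List Nat) (hb : ∀ x ∈ s, x < n) :
    pvRefl n (pvRefl n s) = s := by
  unfold pvRefl
  rw [List.map_map]
  conv_rhs => rw [← List.map_id s]
  apply List.map_congr_left
  intro j hj
  have := hb j hj
  simp only [Function.comp, id]
  omega

theorem pv_canon_congr (n : Nat) (X Y : List Nat) (h : X.Perm Y) : pvCanon n X = pvCanon n Y := by
  unfold pvCanon
  apply List.filter_congr
  intro x _
  by_cases hx : x ∈ X
  · have hx2 : x ∈ Y := h.mem_iff.mp hx
    simp [hx, hx2]
  · have hx2 : x ∉ Y := fun hh => hx (h.mem_iff.mpr hh)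
    simp [hx, hx2]

theorem pv_refl_perm (arr : List (List Int)) (n k : Nat) :
    ((pvCombsN (List.range n) k).map (fun s => pvPsi arr n (pvRefl n s))).Perm
      ((pvCombsN (List.range n) k).map (pvPsi arr n)) := by
  have hmemC : ∀ s ∈ pvCombsN (List.range n) k, s.length = k ∧ List.Sublist s (List.range n) :=
    fun s hs => (pv_mem_combsN _ _ s).mp hs
  have hbC : ∀ s ∈ pvCombsN (List.range n) k, ∀ x ∈ s, x < n := by
    intro s hs x hx
    have := (hmemC s hs).2.subset hx
    simpa [List.mem_range] using this
  have hndC : ∀ s ∈ pvCombsN (List.range n) k, s.Nodup :=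
    fun s hs => List.nodup_range.sublist (hmemC s hs).2
  have hrb : ∀ s ∈ pvCombsN (List.range n) k, ∀ x ∈ pvRefl n s, x < n := by
    intro s hs x hx
    simp only [pvRefl, List.mem_map] at hx
    obtain ⟨j, hj, rfl⟩ := hx
    have := hbC s hs j hj
    omega
  have hrn : ∀ s ∈ pvCombsN (List.range n) k, (pvRefl n s).Nodup := by
    intro s hs
    refine (hndC s hs).map_on ?_
    intro a ha b hb heq
    have := hbC s hs a ha
    have := hbC s hs b hb
    omega
  have hcanonmem : ∀ s ∈ pvCombsN (List.range n) k,
      pvCanon n (pvRefl n s) ∈ pvCombsN (List.range n) k := by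
    intro s hs
    rw [pv_mem_combsN]
    constructor
    · rw [(pv_canon_perm n (pvRefl n s) (hrn s hs) (hrb s hs)).length_eq]
      simp only [pvRefl, List.length_map]
      exact (hmemC s hs).1
    · exact List.filter_sublist
  have hcanoninv : ∀ s ∈ pvCombsN (List.range n) k,
      pvCanon n (pvRefl n (pvCanon n (pvRefl n s))) = s := by
    intro s hs
    have hp1 : (pvCanon n (pvRefl n s)).Perm (pvRefl n s) :=
      pv_canon_perm n (pvRefl n s) (hrn s hs) (hrb s hs)
    have hp2 : (pvRefl n (pvCanon n (pvRefl n s))).Perm (pvRefl n (pvRefl n s)) := hp1.map _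
    rw [pv_refl_refl n s (hbC s hs)] at hp2
    rw [pv_canon_congr n _ _ hp2]
    exact pv_canon_eq_self n s (hmemC s hs).2
  have hstep1 : (pvCombsN (List.range n) k).map (fun s => pvPsi arr n (pvRefl n s))
      = (pvCombsN (List.range n) k).map (fun s => pvPsi arr n (pvCanon n (pvRefl n s))) := by
    apply List.map_congr_left
    intro s hs
    exact (pv_psi_perm arr n _ _ (pv_canon_perm n (pvRefl n s) (hrn s hs) (hrb s hs))).symm
  rw [hstep1]
  rw [show (fun s => pvPsi arr n (pvCanon n (pvRefl n s)))
      = (pvPsi arr n) ∘ (fun s => pvCanon n (pvRefl n s)) from rfl]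
  rw [← List.map_map]
  refine List.Perm.map _ ?_
  apply List.perm_of_nodup_nodup_toFinset_eq
  · refine (pv_nodup_combsN _ k List.nodup_range).map_on ?_
    intro s1 hs1 s2 hs2 heq
    have h1 := hcanoninv s1 hs1
    have h2 := hcanoninv s2 hs2
    rw [← h1, ← h2, heq]
  · exact pv_nodup_combsN _ k List.nodup_range
  · ext s
    simp only [List.mem_toFinset, List.mem_map]
    constructor
    · rintro ⟨c, hc, rfl⟩
      exact hcanonmem c hc
    · intro hs
      exact ⟨pvCanon n (pvRefl n s), hcanonmem s hs, hcanoninv s hs⟩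

theorem pv_foldl_min_perm (l1 l2 : List Int) (h : l1.Perm l2) (b : Int) :
    l1.foldl min b = l2.foldl min b :=
  @List.Perm.foldl_eq _ _ min l1 l2 ⟨fun x y z => by omega⟩ h b

-- odd N: both programs keep the sentinel
theorem pv_A_odd (arr : List (List Int)) (N : Int) (h : ¬ (2 ∣ N)) : cook_min arr N = 320000 := by
  unfold cook_min
  refine (pv_foldl_id _ _ _ ?_).trans (by norm_num)
  intro acc i
  dsimp only
  split
  · rfl
  · rename_i hcond
    exfalso
    apply h
    rw [not_ne_iff] at hcond
    exact ⟨_, hcond.symm⟩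

theorem pv_B_odd (arr : List (List Int)) (N : Int) (h : ¬ (2 ∣ N)) : cook_min_alt arr N = 320000 := by
  unfold cook_min_alt
  rw [if_neg (fun hmod => h ((PySem.Int.mod_eq_zero_iff_dvd N 2).mp hmod))]
  norm_num

-- ===== VERDICT (by name: the statement is the Claim_ definition above) =====
theorem cook_min_spec : Claim_equal_cook_min := by
  intro arr N _hdom hpre
  obtain ⟨hN0, hcase⟩ := hpre
  unfold Spec_cook_min
  by_cases h2 : (2 : Int) ∣ N
  · rcases hcase with hodd | ⟨hlen, _hrows⟩
    · exact absurd h2 hodd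
    · have hN : N = ((N.toNat : Nat) : Int) := (Int.toNat_of_nonneg hN0).symm
      set n := N.toNat with hn
      have h2n : 2 ∣ n := by
        have : ((2 : Nat) : Int) ∣ ((n : Nat) : Int) := by rw [← hN]; exact_mod_cast h2
        exact_mod_cast this
      obtain ⟨k, hk⟩ := h2n
      have hm : n ≤ arr.length := by
        have := hlen
        rw [hN] at this
        exact_mod_cast this
      rw [hN, pv_A_even arr n k hk hm, pv_B_even arr n k hk]
      refine pv_foldl_min_perm _ _ ?_ _
      exact ((pv_crux n k).map _).trans (pv_refl_perm arr n k)
  · rw [pv_A_odd arr N h2, pv_B_odd arr N h2]
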